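-- pv_equiv track=rewrite | github.com/super30admin/Competitive-Coding-2 | 1Kansack.py | helper
-- ===== SOURCE A (Python) =====
-- def helper(weights, values, capacity, maxCurrentWeight, idx):
--     #     base
--     if capacity == 0:
--         return maxCurrentWeight
--     if idx >= len(values) or capacity < 0:
--         return -1
--
--     choose = helper(weights, values, capacity - weights[idx], maxCurrentWeight + values[idx], idx + 1)
--     noChoose = helper(weights, values, capacity, maxCurrentWeight, idx + 1)
--
--     return max(choose, noChoose)
-- ===== SOURCE B (Python) =====
-- def helper(weights, values, capacity, maxCurrentWeight, idx):
--     n = len(values)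
--     if capacity == 0:
--         return maxCurrentWeight
--     if idx >= n or capacity < 0:
--         return -1
--     best = None
--     states = {capacity: 0}  # remaining capacity -> max value collected so far
--     for j in range(idx, n):
--         wj = weights[j]
--         vj = values[j]
--         new = {}
--         for r, val in states.items():
--             if r == 0:
--                 best = val if best is None else max(best, val)
--                 continue
--             if r < 0:
--                 continue
--             new[r] = max(new.get(r, val), val)
--             r2 = r - wj
--             v2 = val + vj
--             new[r2] = max(new.get(r2, v2), v2)
--         states = new
--     for r, val in states.items():
--         if r == 0:
--             best = val if best is None else max(best, val)
--     return -1 if best is None else max(-1, maxCurrentWeight + best)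
-- ===== Notes on version B (the rewrite author's own statement) =====
-- stated objective: alternative
-- what changed: Replaces the depth-first choose/no-choose recursion by an iterative level-by-level DP: a dict mapping remaining capacity to the best value collected so far, states with equal remaining capacity merged with max, and maxCurrentWeight handled as an additive offset applied once at the end.
import Mathlib
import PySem

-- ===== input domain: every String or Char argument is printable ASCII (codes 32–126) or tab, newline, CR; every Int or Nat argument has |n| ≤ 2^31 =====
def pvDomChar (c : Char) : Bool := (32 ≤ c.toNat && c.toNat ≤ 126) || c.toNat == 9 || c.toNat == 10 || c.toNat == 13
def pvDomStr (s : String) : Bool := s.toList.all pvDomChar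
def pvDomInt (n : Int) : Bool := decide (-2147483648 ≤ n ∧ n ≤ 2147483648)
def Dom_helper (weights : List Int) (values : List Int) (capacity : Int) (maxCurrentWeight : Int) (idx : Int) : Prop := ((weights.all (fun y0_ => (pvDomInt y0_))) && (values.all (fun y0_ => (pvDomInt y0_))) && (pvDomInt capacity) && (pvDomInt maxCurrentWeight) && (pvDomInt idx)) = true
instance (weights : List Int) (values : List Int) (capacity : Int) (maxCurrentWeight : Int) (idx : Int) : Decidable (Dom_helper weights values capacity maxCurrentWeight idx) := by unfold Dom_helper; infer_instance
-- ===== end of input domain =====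

-- B replaces A's depth-first choose/no-choose recursion by a level-by-level dict DP over
-- remaining capacities (states with equal remaining capacity merged with max), with
-- maxCurrentWeight handled as an additive offset applied once at the end.

-- ===== PORT A =====
def helper (weights : List Int) (values : List Int) (capacity : Int) (maxCurrentWeight : Int) (idx : Int) : Int :=
  if capacity = 0 then maxCurrentWeight
  else if idx ≥ (values.length : Int) ∨ capacity < 0 then -1
  else
    -- weights[idx] / values[idx]: Python indexing (negative wrap); Pre_ excludes the IndexError inputs
    let choose := helper weights values (capacity - (PySem.List.pyGet? weights idx).getD 0)
      (maxCurrentWeight + (PySem.List.pyGet? values idx).getD 0) (idx + 1)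
    let noChoose := helper weights values capacity maxCurrentWeight (idx + 1)
    max choose noChoose
termination_by ((values.length : Int) - idx).toNat
decreasing_by all_goals (simp at *; omega)

-- ===== PORT B =====
-- max of an optional best with a new candidate ('val if best is None else max(best, val)')
def omax : Option Int → Option Int → Option Int
  | none, o => o
  | o, none => o
  | some a, some b => some (max a b)

-- 'new[r] = max(new.get(r, v), v)'
def mergeMax (d : PySem.Dict Int Int) (r v : Int) : PySem.Dict Int Int :=
  d.insert r (max (d.getD r v) v)

-- body of the inner 'for r, val in states.items()' loop
def innerStep (wj vj : Int) (st2 : Option Int × PySem.Dict Int Int) (p : Int × Int) :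
    Option Int × PySem.Dict Int Int :=
  if p.1 = 0 then (omax st2.1 (some p.2), st2.2)
  else if p.1 < 0 then st2
  else (st2.1, mergeMax (mergeMax st2.2 p.1 p.2) (p.1 - wj) (p.2 + vj))

-- body of the outer 'for j in range(idx, n)' loop
def levelStep (weights values : List Int) (st : Option Int × PySem.Dict Int Int) (j : Int) :
    Option Int × PySem.Dict Int Int :=
  st.2.items.foldl
    (innerStep ((PySem.List.pyGet? weights j).getD 0) ((PySem.List.pyGet? values j).getD 0))
    (st.1, PySem.Dict.empty)

def helper_alt (weights : List Int) (values : List Int) (capacity : Int) (maxCurrentWeight : Int) (idx : Int) : Int :=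
  let n : Int := values.length
  if capacity = 0 then maxCurrentWeight
  else if idx ≥ n ∨ capacity < 0 then -1
  else
    let fin := (PySem.List.pyRange idx n).foldl (levelStep weights values)
      (none, PySem.Dict.empty.insert capacity 0)
    let best := fin.2.items.foldl (fun b p => if p.1 = 0 then omax b (some p.2) else b) fin.1
    match best with
    | none => -1
    | some b => max (-1) (maxCurrentWeight + b)

-- ===== PRECONDITION & SPEC =====
-- Pre_ excludes exactly the inputs where A raises IndexError: capacity > 0 and idx < len(values)
-- force every index in [idx, len(values)) to be read from both lists with Python indexing.
def Pre_helper (weights : List Int) (values : List Int) (capacity : Int) (maxCurrentWeight : Int) (idx : Int) : Prop :=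
  capacity ≤ 0 ∨ idx ≥ (values.length : Int) ∨
    ((values.length : Int) ≤ (weights.length : Int) ∧ -(weights.length : Int) ≤ idx ∧ -(values.length : Int) ≤ idx)
instance (weights : List Int) (values : List Int) (capacity : Int) (maxCurrentWeight : Int) (idx : Int) : Decidable (Pre_helper weights values capacity maxCurrentWeight idx) := by unfold Pre_helper; infer_instance
def pvWitness_helper : List Int × List Int × Int × Int × Int := ([2, 3, 1], [4, 5, 6], 4, 0, 0)
def Spec_helper (weights : List Int) (values : List Int) (capacity : Int) (maxCurrentWeight : Int) (idx : Int) (out : Int) : Prop := out = helper_alt weights values capacity maxCurrentWeight idx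
instance (weights : List Int) (values : List Int) (capacity : Int) (maxCurrentWeight : Int) (idx : Int) (out : Int) : Decidable (Spec_helper weights values capacity maxCurrentWeight idx out) := by unfold Spec_helper; infer_instance

-- ===== CLAIM (what is proved, stated in full; the proofs are below) =====
def Claim_equal_helper : Prop := ∀ (weights : List Int) (values : List Int) (capacity : Int) (maxCurrentWeight : Int) (idx : Int), Dom_helper weights values capacity maxCurrentWeight idx → Pre_helper weights values capacity maxCurrentWeight idx → Spec_helper weights values capacity maxCurrentWeight idx (helper weights values capacity maxCurrentWeight idx)

-- ===== LEMMAS AND PROOFS =====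

-- the mathematical value both programs compute: best total of values over subsets of the items
-- from index i on whose running weight hits the remaining capacity exactly (never dipping below 0)
def bestv (weights values : List Int) (i r : Int) : Option Int :=
  if r = 0 then some 0
  else if i ≥ (values.length : Int) ∨ r < 0 then none
  else omax ((bestv weights values (i + 1) (r - (PySem.List.pyGet? weights i).getD 0)).map
               (· + (PySem.List.pyGet? values i).getD 0))
            (bestv weights values (i + 1) r)
termination_by ((values.length : Int) - i).toNat
decreasing_by all_goals (simp at *; omega)

-- A's result in terms of bestv
def gfin (o : Option Int) (m : Int) : Int :=
  match o with
  | none => -1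
  | some b => max (-1) (m + b)

theorem omax_comm (a b : Option Int) : omax a b = omax b a := by
  cases a <;> cases b <;> simp [omax] <;> omega

theorem omax_none_right (a : Option Int) : omax a none = a := by cases a <;> rfl

theorem omax_assoc (a b c : Option Int) : omax (omax a b) c = omax a (omax b c) := by
  cases a <;> cases b <;> cases c <;> simp [omax] <;> omega

theorem omax_left_comm (a b c : Option Int) : omax a (omax b c) = omax b (omax a c) := by
  rw [← omax_assoc, omax_comm a b, omax_assoc]

theorem gfin_omax (a b : Option Int) (m : Int) :
    gfin (omax a b) m = max (gfin a m) (gfin b m) := by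
  cases a <;> cases b <;> simp [omax, gfin] <;> omega

-- A = gfin ∘ bestv
theorem neg_one_le_gfin (o : Option Int) (m : Int) : -1 ≤ gfin o m := by
  cases o <;> simp [gfin]

theorem gfin_map_add (o : Option Int) (m v : Int) :
    gfin (o.map (· + v)) m = gfin o (m + v) := by
  cases o <;> simp [gfin] <;> omega

theorem bestv_of_ge (weights values : List Int) (i r : Int)
    (h : (values.length : Int) ≤ i) :
    bestv weights values i r = if r = 0 then some 0 else none := by
  rw [bestv]
  by_cases h0 : r = 0 <;> simp [h0, h]

theorem helper_eq_bestv (weights values : List Int) (capacity m idx : Int) :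
    helper weights values capacity m idx =
      if capacity = 0 then m
      else if idx ≥ (values.length : Int) ∨ capacity < 0 then -1
      else gfin (bestv weights values idx capacity) m := by
  suffices H : ∀ (k : Nat) (idx capacity m : Int), ((values.length : Int) - idx).toNat ≤ k →
      helper weights values capacity m idx =
        if capacity = 0 then m
        else if idx ≥ (values.length : Int) ∨ capacity < 0 then -1
        else gfin (bestv weights values idx capacity) m from H _ idx capacity m le_rfl
  intro k
  induction k with
  | zero =>
      intro idx capacity m hk
      have hge : (values.length : Int) ≤ idx := by omega
      rw [helper]
      by_cases h0 : capacity = 0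
      · simp [h0]
      · simp [h0, hge]
  | succ k ih =>
      intro idx capacity m hk
      rw [helper]
      by_cases h0 : capacity = 0
      · simp [h0]
      · by_cases h1 : idx ≥ (values.length : Int) ∨ capacity < 0
        · simp [h0, h1]
        · rw [if_neg h0, if_neg h1, if_neg h0, if_neg h1]
          have hlt : idx < (values.length : Int) := by omega
          have hpos : 0 ≤ capacity := by omega
          have hm : ((values.length : Int) - (idx + 1)).toNat ≤ k := by omega
          show max
            (helper weights values (capacity - (PySem.List.pyGet? weights idx).getD 0)
              (m + (PySem.List.pyGet? values idx).getD 0) (idx + 1))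
            (helper weights values capacity m (idx + 1))
            = gfin (bestv weights values idx capacity) m
          rw [ih (idx + 1) (capacity - (PySem.List.pyGet? weights idx).getD 0)
                (m + (PySem.List.pyGet? values idx).getD 0) hm,
              ih (idx + 1) capacity m hm]
          have hbest : bestv weights values idx capacity
              = omax ((bestv weights values (idx + 1)
                    (capacity - (PySem.List.pyGet? weights idx).getD 0)).map
                  (· + (PySem.List.pyGet? values idx).getD 0))
                (bestv weights values (idx + 1) capacity) := by
            conv_lhs => rw [bestv]
            rw [if_neg h0, if_neg (by omega)]
          rw [hbest, gfin_omax, gfin_map_add]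
          have hA2 : (if capacity = 0 then m
              else if idx + 1 ≥ (values.length : Int) ∨ capacity < 0 then -1
              else gfin (bestv weights values (idx + 1) capacity) m)
              = gfin (bestv weights values (idx + 1) capacity) m := by
            rw [if_neg h0]
            by_cases h2 : idx + 1 ≥ (values.length : Int) ∨ capacity < 0
            · have ho2 : bestv weights values (idx + 1) capacity = none := by
                rcases h2 with h2 | h2
                · rw [bestv_of_ge _ _ _ _ h2, if_neg h0]
                · omega
              rw [if_pos h2, ho2]
              rfl
            · rw [if_neg h2]
          rw [hA2]
          by_cases hc0 : capacity - (PySem.List.pyGet? weights idx).getD 0 = 0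
          · have ho1 : bestv weights values (idx + 1)
                (capacity - (PySem.List.pyGet? weights idx).getD 0) = some 0 := by
              rw [bestv, if_pos hc0]
            rw [if_pos hc0, ho1]
            have h2 := neg_one_le_gfin (bestv weights values (idx + 1) capacity) m
            simp only [gfin, add_zero] at h2 ⊢
            omega
          · have hA1 : (if capacity - (PySem.List.pyGet? weights idx).getD 0 = 0 then
                m + (PySem.List.pyGet? values idx).getD 0
                else if idx + 1 ≥ (values.length : Int) ∨
                    capacity - (PySem.List.pyGet? weights idx).getD 0 < 0 then -1
                else gfin (bestv weights values (idx + 1)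
                  (capacity - (PySem.List.pyGet? weights idx).getD 0))
                  (m + (PySem.List.pyGet? values idx).getD 0))
                = gfin (bestv weights values (idx + 1)
                    (capacity - (PySem.List.pyGet? weights idx).getD 0))
                  (m + (PySem.List.pyGet? values idx).getD 0) := by
              rw [if_neg hc0]
              by_cases h2 : idx + 1 ≥ (values.length : Int) ∨
                  capacity - (PySem.List.pyGet? weights idx).getD 0 < 0
              · have ho1 : bestv weights values (idx + 1)
                    (capacity - (PySem.List.pyGet? weights idx).getD 0) = none := by
                  rw [bestv, if_neg hc0, if_pos h2]
                rw [if_pos h2, ho1]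
                rfl
              · rw [if_neg h2]
            rw [hA1]

-- ===== B-side fold machinery =====

def foldOmax (F : Int × Int → Option Int) (l : List (Int × Int)) (a : Option Int) : Option Int :=
  l.foldl (fun b p => omax b (F p)) a

def score (weights values : List Int) (j : Int) (p : Int × Int) : Option Int :=
  (bestv weights values j p.1).map (p.2 + ·)

theorem foldOmax_out (F : Int × Int → Option Int) (l : List (Int × Int)) (x s : Option Int) :
    foldOmax F l (omax x s) = omax (foldOmax F l x) s := by
  induction l generalizing x with
  | nil => rfl
  | cons p t ih =>
      simp only [foldOmax, List.foldl_cons] at *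
      rw [omax_assoc, omax_comm s, ← omax_assoc, ih]

theorem foldOmax_start (F : Int × Int → Option Int) (l : List (Int × Int)) (x : Option Int) :
    foldOmax F l x = omax x (foldOmax F l none) := by
  have h := foldOmax_out F l none x
  rw [show omax none x = x from rfl] at h
  rw [h, omax_comm]

theorem foldOmax_merge (F G H : Int × Int → Option Int)
    (h : ∀ p, omax (F p) (G p) = H p) (l : List (Int × Int)) :
    omax (foldOmax F l none) (foldOmax G l none) = foldOmax H l none := by
  induction l with
  | nil => rfl
  | cons p t ih =>
      rw [show foldOmax F (p :: t) none = foldOmax F t (F p) from rfl, foldOmax_start F t,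
          show foldOmax G (p :: t) none = foldOmax G t (G p) from rfl, foldOmax_start G t,
          show foldOmax H (p :: t) none = foldOmax H t (H p) from rfl, foldOmax_start H t]
      rw [omax_assoc, omax_left_comm (foldOmax F t none) (G p), ← omax_assoc, h p]
      rw [ih]

-- replacing the unique entry at key r by the max only joins the new candidate's score
theorem foldOmax_subst (F : Int × Int → Option Int) (r u v : Int)
    (hF : F (r, max u v) = omax (F (r, u)) (F (r, v))) (l : List (Int × Int))
    (hnd : (l.map Prod.fst).Nodup) (hmem : (r, u) ∈ l) (a : Option Int) :
    foldOmax F (l.map (fun p => if p.1 == r then (r, max u v) else p)) a =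
      omax (foldOmax F l a) (F (r, v)) := by
  induction l generalizing a with
  | nil => cases hmem
  | cons q t ih =>
      simp only [List.map_cons, List.nodup_cons, List.mem_map] at hnd
      by_cases hq : q.1 = r
      · have hqe : q = (r, u) := by
          rcases List.mem_cons.mp hmem with h | h
          · exact h.symm
          · exact absurd ⟨(r, u), h, by simp [hq]⟩ hnd.1
        have hmap : t.map (fun p => if p.1 == r then (r, max u v) else p) = t := by
          conv_rhs => rw [← List.map_id t]
          apply List.map_congr_left
          intro p hp
          have hne : p.1 ≠ r := by
            intro he; exact hnd.1 ⟨p, hp, by simp [he, hq]⟩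
          simp [hne]
        simp only [List.map_cons, hq, beq_self_eq_true, if_true, foldOmax, List.foldl_cons, hmap]
        rw [hqe]
        show foldOmax F t (omax a (F (r, max u v))) =
          omax (foldOmax F t (omax a (F (r, u)))) (F (r, v))
        rw [hF, ← omax_assoc, foldOmax_out]
      · have hmem' : (r, u) ∈ t := by
          rcases List.mem_cons.mp hmem with h | h
          · exact absurd (by rw [← h]) hq
          · exact h
        simp only [List.map_cons, show (q.1 == r) = false by simp [hq], Bool.false_eq_true,
          foldOmax, List.foldl_cons]
        exact ih hnd.2 hmem' _

theorem score_max (w v : List Int) (j r u vv : Int) :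
    score w v j (r, max u vv) = omax (score w v j (r, u)) (score w v j (r, vv)) := by
  cases h : bestv w v j r <;> simp [score, h, omax] <;> omega

theorem M_mergeMax (weights values : List Int) (j : Int) (d : PySem.Dict Int Int)
    (hnd : d.keys.Nodup) (r v : Int) :
    foldOmax (score weights values j) (mergeMax d r v).items none =
      omax (foldOmax (score weights values j) d.items none) (score weights values j (r, v)) := by
  unfold mergeMax
  by_cases hc : d.contains r
  · obtain ⟨u, hu⟩ : ∃ u, d.get? r = some u := by
      have := PySem.Dict.contains_eq_isSome_get? d r
      rw [hc] at this
      exact Option.isSome_iff_exists.mp this.symm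
    rw [PySem.Dict.getD_of_get?_eq_some d v hu,
        PySem.Dict.items_insert_of_contains d (max u v) hc]
    exact foldOmax_subst _ r u v (score_max _ _ _ _ _ _) d.items hnd
      (PySem.Dict.mem_items_of_get?_eq_some d hu) none
  · rw [PySem.Dict.getD_of_not_contains d v (by simpa using hc), max_self,
        PySem.Dict.items_insert_of_not_contains d v (by simpa using hc)]
    show foldOmax _ (d.items ++ [(r, v)]) none = _
    unfold foldOmax
    rw [List.foldl_append]
    rfl

-- the per-item contribution of one state of the dict, entering level j + 1
def contrib (weights values : List Int) (j wj vj : Int) (p : Int × Int) : Option Int :=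
  if p.1 = 0 then none
  else if p.1 < 0 then none
  else omax (score weights values (j + 1) (p.1, p.2))
            (score weights values (j + 1) (p.1 - wj, p.2 + vj))

-- harvesting of exactly-filled states
def zsc (p : Int × Int) : Option Int := if p.1 = 0 then some p.2 else none

-- the inner per-level loop splits into the best-accumulator fold and the dict fold
theorem inner_split (wj vj : Int) (l : List (Int × Int)) (b : Option Int) (d : PySem.Dict Int Int) :
    l.foldl (innerStep wj vj) (b, d)
      = (l.foldl (fun b p => if p.1 = 0 then omax b (some p.2) else b) b,
         l.foldl (fun d p => if p.1 = 0 then d else if p.1 < 0 then d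
            else mergeMax (mergeMax d p.1 p.2) (p.1 - wj) (p.2 + vj)) d) := by
  induction l generalizing b d with
  | nil => rfl
  | cons p t ih =>
      simp only [List.foldl_cons, innerStep]
      split_ifs <;> exact ih _ _

theorem nodup_dictFold (wj vj : Int) (l : List (Int × Int)) (d : PySem.Dict Int Int)
    (hnd : d.keys.Nodup) :
    ((l.foldl (fun d p => if p.1 = 0 then d else if p.1 < 0 then d
        else mergeMax (mergeMax d p.1 p.2) (p.1 - wj) (p.2 + vj)) d)).keys.Nodup := by
  induction l generalizing d with
  | nil => exact hnd
  | cons p t ih =>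
      simp only [List.foldl_cons]
      split_ifs
      · exact ih d hnd
      · exact ih d hnd
      · exact ih _ (PySem.Dict.nodup_keys_insert _ _ _ (PySem.Dict.nodup_keys_insert _ _ _ hnd))

theorem M_dictFold (weights values : List Int) (j wj vj : Int) (l : List (Int × Int))
    (d : PySem.Dict Int Int) (hnd : d.keys.Nodup) :
    foldOmax (score weights values (j + 1))
        ((l.foldl (fun d p => if p.1 = 0 then d else if p.1 < 0 then d
          else mergeMax (mergeMax d p.1 p.2) (p.1 - wj) (p.2 + vj)) d)).items none
      = foldOmax (contrib weights values j wj vj) l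
          (foldOmax (score weights values (j + 1)) d.items none) := by
  induction l generalizing d with
  | nil => rfl
  | cons p t ih =>
      simp only [List.foldl_cons, foldOmax, List.foldl_cons] at *
      by_cases h0 : p.1 = 0
      · rw [if_pos h0, ih d hnd, show contrib weights values j wj vj p = none by
          simp [contrib, h0]]
        rw [omax_none_right]
      · by_cases hneg : p.1 < 0
        · rw [if_neg h0, if_pos hneg, ih d hnd, show contrib weights values j wj vj p = none by
            simp [contrib, h0, hneg]]
          rw [omax_none_right]
        · have hnd1 : (mergeMax d p.1 p.2).keys.Nodup :=
            PySem.Dict.nodup_keys_insert _ _ _ hnd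
          have hnd2 : (mergeMax (mergeMax d p.1 p.2) (p.1 - wj) (p.2 + vj)).keys.Nodup :=
            PySem.Dict.nodup_keys_insert _ _ _ hnd1
          rw [if_neg h0, if_neg hneg, ih _ hnd2]
          congr 1
          show foldOmax _ (mergeMax (mergeMax d p.1 p.2) (p.1 - wj) (p.2 + vj)).items none = _
          rw [M_mergeMax _ _ _ _ hnd1, M_mergeMax _ _ _ _ hnd, omax_assoc]
          show _ = omax (foldOmax (score weights values (j + 1)) d.items none)
            (contrib weights values j wj vj p)
          rw [show contrib weights values j wj vj p
              = omax (score weights values (j + 1) (p.1, p.2))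
                  (score weights values (j + 1) (p.1 - wj, p.2 + vj)) by
            simp [contrib, h0, hneg]]

theorem bestFold_eq (l : List (Int × Int)) (b : Option Int) :
    l.foldl (fun b p => if p.1 = 0 then omax b (some p.2) else b) b = foldOmax zsc l b := by
  unfold foldOmax
  apply PySem.List.foldl_congr_mem
  intro acc p _
  by_cases h : p.1 = 0 <;> simp [h, zsc, omax_none_right]

-- one level consumes exactly the level-j scores
theorem bestv_pos (w v : List Int) (j r : Int) (h0 : r ≠ 0)
    (h : ¬(j ≥ (v.length : Int) ∨ r < 0)) :
    bestv w v j r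
      = omax ((bestv w v (j + 1) (r - (PySem.List.pyGet? w j).getD 0)).map
          (· + (PySem.List.pyGet? v j).getD 0)) (bestv w v (j + 1) r) := by
  conv_lhs => rw [bestv]
  rw [if_neg h0, if_neg h]

theorem score_level (weights values : List Int) (j : Int)
    (hj : j < (values.length : Int)) (p : Int × Int) :
    omax (zsc p)
        (contrib weights values j ((PySem.List.pyGet? weights j).getD 0)
          ((PySem.List.pyGet? values j).getD 0) p)
      = score weights values j p := by
  rcases p with ⟨r, val⟩
  by_cases h0 : r = 0
  · subst h0
    have hb : bestv weights values j 0 = some 0 := by rw [bestv, if_pos rfl]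
    simp [zsc, contrib, score, hb, omax]
  · by_cases hneg : r < 0
    · have hb : bestv weights values j r = none := by
        rw [bestv, if_neg h0, if_pos (by omega)]
      simp [zsc, contrib, score, h0, hneg, hb, omax]
    · have hb := bestv_pos weights values j r h0 (by omega)
      cases hb1 : bestv weights values (j + 1) (r - (PySem.List.pyGet? weights j).getD 0) <;>
        cases hb2 : bestv weights values (j + 1) r <;>
          simp [zsc, contrib, score, h0, hneg, hb, hb1, hb2, omax] <;> omega

theorem score_of_ge (weights values : List Int) (j : Int)
    (h : (values.length : Int) ≤ j) (p : Int × Int) :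
    score weights values j p = zsc p := by
  rcases p with ⟨r, val⟩
  simp only [score, zsc, bestv_of_ge _ _ _ _ h]
  by_cases h0 : r = 0 <;> simp [h0]

theorem foldOmax_congr (F G : Int × Int → Option Int) (h : ∀ p, F p = G p)
    (l : List (Int × Int)) (x : Option Int) : foldOmax F l x = foldOmax G l x := by
  unfold foldOmax
  apply PySem.List.foldl_congr_mem
  intro acc p _
  rw [h p]

-- running the remaining levels preserves the joined value
theorem outer_loop (weights values : List Int) :
    ∀ (k : Nat) (j : Int) (b : Option Int) (d : PySem.Dict Int Int),
      ((values.length : Int) - j).toNat ≤ k → d.keys.Nodup →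
      omax ((PySem.List.pyRange j (values.length : Int)).foldl (levelStep weights values) (b, d)).1
        (foldOmax (score weights values (values.length : Int))
          ((PySem.List.pyRange j (values.length : Int)).foldl
            (levelStep weights values) (b, d)).2.items none)
      = omax b (foldOmax (score weights values j) d.items none) := by
  have base : ∀ (j : Int) (b : Option Int) (d : PySem.Dict Int Int),
      (values.length : Int) ≤ j →
      omax ((PySem.List.pyRange j (values.length : Int)).foldl (levelStep weights values) (b, d)).1
        (foldOmax (score weights values (values.length : Int))
          ((PySem.List.pyRange j (values.length : Int)).foldl
            (levelStep weights values) (b, d)).2.items none)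
      = omax b (foldOmax (score weights values j) d.items none) := by
    intro j b d hj
    rw [show PySem.List.pyRange j (values.length : Int) = [] by
      simp [PySem.List.pyRange, hj]]
    simp only [List.foldl_nil]
    congr 1
    exact foldOmax_congr _ _
      (fun p => (score_of_ge weights values _ le_rfl p).trans
        (score_of_ge weights values j hj p).symm) d.items none
  intro k
  induction k with
  | zero =>
      intro j b d hk hnd
      exact base j b d (by omega)
  | succ k ih =>
      intro j b d hk hnd
      by_cases hj : (values.length : Int) ≤ j
      · exact base j b d hj
      · rw [PySem.List.pyRange_one_cons (by omega), List.foldl_cons]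
        rw [show levelStep weights values (b, d) j
            = (d.items.foldl (fun b p => if p.1 = 0 then omax b (some p.2) else b) b,
               d.items.foldl (fun d p => if p.1 = 0 then d else if p.1 < 0 then d
                 else mergeMax (mergeMax d p.1 p.2)
                   (p.1 - (PySem.List.pyGet? weights j).getD 0)
                   (p.2 + (PySem.List.pyGet? values j).getD 0)) PySem.Dict.empty) from
          inner_split _ _ _ _ _]
        rw [ih (j + 1) _ _ (by omega)
          (nodup_dictFold _ _ _ _ PySem.Dict.nodup_keys_empty)]
        rw [M_dictFold weights values j _ _ _ _ PySem.Dict.nodup_keys_empty]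
        rw [show foldOmax (score weights values (j + 1)) (PySem.Dict.empty).items none
            = none from rfl]
        rw [bestFold_eq, foldOmax_start]
        rw [omax_assoc]
        rw [foldOmax_merge zsc _ (score weights values j)
          (fun p => score_level weights values j (by omega) p) d.items]

theorem helper_alt_eq_bestv (weights values : List Int) (capacity m idx : Int) :
    helper_alt weights values capacity m idx =
      if capacity = 0 then m
      else if idx ≥ (values.length : Int) ∨ capacity < 0 then -1
      else gfin (bestv weights values idx capacity) m := by
  simp only [helper_alt]
  by_cases h0 : capacity = 0
  · simp [h0]
  · by_cases h1 : idx ≥ (values.length : Int) ∨ capacity < 0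
    · simp [h0, h1]
    · rw [if_neg h0, if_neg h1, if_neg h0, if_neg h1]
      show gfin
        (((PySem.List.pyRange idx ((values.length : Int))).foldl (levelStep weights values)
            (none, PySem.Dict.empty.insert capacity 0)).2.items.foldl
          (fun b p => if p.1 = 0 then omax b (some p.2) else b)
          ((PySem.List.pyRange idx ((values.length : Int))).foldl (levelStep weights values)
            (none, PySem.Dict.empty.insert capacity 0)).1) m
        = gfin (bestv weights values idx capacity) m
      congr 1
      rw [bestFold_eq, foldOmax_start]
      rw [foldOmax_congr zsc (score weights values (values.length : Int))
        (fun p => (score_of_ge weights values _ le_rfl p).symm)]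
      rw [outer_loop weights values ((values.length : Int) - idx).toNat idx none _ le_rfl
        (PySem.Dict.nodup_keys_insert _ _ _ PySem.Dict.nodup_keys_empty)]
      rw [show (PySem.Dict.empty.insert capacity 0 : PySem.Dict Int Int).items
          = [(capacity, 0)] from by
        rw [PySem.Dict.items_insert_of_not_contains _ _ (by rfl)]
        rfl]
      show score weights values idx (capacity, 0) = bestv weights values idx capacity
      simp only [score]
      cases bestv weights values idx capacity <;> simp

-- ===== VERDICT (by name: the statement is the Claim_ definition above) =====
theorem helper_spec : Claim_equal_helper := by
  intro weights values capacity maxCurrentWeight idx _ _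
  unfold Spec_helper
  rw [helper_eq_bestv, helper_alt_eq_bestv]
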